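-- pv_equiv track=rewrite | github.com/TengFeiyang01/Algorithm | bishi/8-23腾讯音乐/d.py | solve
-- ===== SOURCE A (Python) =====
-- class T:
--     def __init__(self, e, v):
--         self.e = e
--         self.v = v
--
-- class Node:
--     def __init__(self):
--         self.left = None
--         self.right = None
--         self.val = 0
--
-- def dfs(arr, d):
--     left, right = [], []
--     for t in arr:
--         if len(t.e) > d:
--             if t.e[d] == '0':
--                 left.append(t)
--             else:
--                 right.append(t)
--
--     cur = Node()
--     if len(left) > 0:
--         cur.left = dfs(left, d + 1)
--         cur.val += cur.left.val
--     if len(right) > 0: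
--         cur.right = dfs(right, d + 1)
--         cur.val += cur.right.val
--     if len(left) == 0 and len(right) == 0:
--         cur.val = arr[0].v
--
--     return cur
--
-- def solve(leaf, vals):
--     n = len(leaf)
--     arr = [T(leaf[i], vals[i]) for i in range(n)]
--
--     root = dfs(arr, 0)
--
--     que = [root]
--     res = []
--     while que:
--         cur = que.pop(0)
--         if cur is None:
--             res.append("#")
--             continue
--         res.append(str(cur.val))
--         que.append(cur.left)
--         que.append(cur.right)
--
--     return res
-- ===== SOURCE B (Python) =====
-- from collections import deque
--
-- def solve(leaf, vals):
--     # Trie built by per-key insertion: child[0] for bit '0', child[1] otherwise;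
--     # term keeps the FIRST value (original order) terminating at the node.
--     class N:
--         __slots__ = ("child", "term")
--         def __init__(self):
--             self.child = [None, None]
--             self.term = None
--
--     root = N()
--     for s, v in zip(leaf, vals):
--         cur = root
--         for c in s:
--             b = 0 if c == '0' else 1
--             if cur.child[b] is None:
--                 cur.child[b] = N()
--             cur = cur.child[b]
--         if cur.term is None:
--             cur.term = v
--
--     # One postorder pass: value tree [val, left, right]; a node with a child
--     # sums its (present) children, a childless node takes its terminator.
--     def value(n):
--         l = value(n.child[0]) if n.child[0] is not None else None
--         r = value(n.child[1]) if n.child[1] is not None else None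
--         if l is None and r is None:
--             val = n.term
--         else:
--             val = (l[0] if l is not None else 0) + (r[0] if r is not None else 0)
--         return [val, l, r]
--
--     vt = value(root)
--
--     res = []
--     q = deque([vt])
--     while q:
--         cur = q.popleft()
--         if cur is None:
--             res.append("#")
--         else:
--             res.append(str(cur[0]))
--             q.append(cur[1])
--             q.append(cur[2])
--     return res
-- ===== Notes on version B (the rewrite author's own statement) =====
-- stated objective: alternative
-- what changed: Replaces A's recursive list-partitioning trie construction (which re-scans and re-splits the whole key list at every depth and mixes value computation into the build) by per-key bitwise insertion into a pointer trie that keeps the first terminating value, followed by a separate postorder pass computing node sums; the final BFS serialization is kept.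
import Mathlib
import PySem

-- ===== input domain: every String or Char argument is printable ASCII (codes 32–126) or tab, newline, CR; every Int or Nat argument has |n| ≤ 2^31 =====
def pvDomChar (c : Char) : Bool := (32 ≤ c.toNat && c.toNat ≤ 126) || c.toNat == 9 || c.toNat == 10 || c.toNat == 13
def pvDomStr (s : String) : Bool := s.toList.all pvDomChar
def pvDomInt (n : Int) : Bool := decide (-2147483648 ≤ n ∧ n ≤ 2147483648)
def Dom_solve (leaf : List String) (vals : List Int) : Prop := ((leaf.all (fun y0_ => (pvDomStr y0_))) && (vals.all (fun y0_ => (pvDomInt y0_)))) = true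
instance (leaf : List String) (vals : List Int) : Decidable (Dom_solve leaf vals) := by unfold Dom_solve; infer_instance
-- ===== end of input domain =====

-- B replaces A's recursive list-partitioning trie construction by per-key bitwise insertion
-- plus a separate postorder value pass (objective: alternative, same asymptotic cost).

-- ===== PORT A =====
-- serialized binary-trie node: none' = absent child (Python None), node = Node(val,left,right)
inductive NTree where
  | none'
  | node (val : Int) (l : NTree) (r : NTree)
deriving DecidableEq, Repr

def ntval : NTree → Int
  | .none' => 0
  | .node v _ _ => v

-- termination helper for dfsA/dfs' (cited by name in decreasing_by)
theorem pvFilterSumAux {α : Type} (q : α → Bool) (f g : α → Nat)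
    (h : ∀ a, q a = true → g a + 1 ≤ f a) :
    ∀ arr : List α, ((arr.filter q).map g).sum + (arr.filter q).length ≤ (arr.map f).sum := by
  intro arr
  induction arr with
  | nil => simp
  | cons a t ih =>
    by_cases hq : q a = true
    · have := h a hq
      simp [hq]
      omega
    · simp [hq]
      omega

theorem pvFilterSumLt {α : Type} (q : α → Bool) (f g : α → Nat)
    (h : ∀ a, q a = true → g a + 1 ≤ f a)
    (arr : List α) (hne : arr.filter q ≠ []) :
    ((arr.filter q).map g).sum < (arr.map f).sum := by
  have h1 := pvFilterSumAux q f g h arr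
  have h2 : 0 < (arr.filter q).length := List.length_pos_of_ne_nil hne
  omega

-- A's dfs: partition arr by character at index d ('0' → left, anything else → right)
def dfsA (arr : List (List Char × Int)) (d : Nat) : NTree :=
  let left := arr.filter (fun p => decide (d < p.1.length) && (p.1.getD d '?' == '0'))
  let right := arr.filter (fun p => decide (d < p.1.length) && !(p.1.getD d '?' == '0'))
  let lt := if _h : left ≠ [] then dfsA left (d + 1) else NTree.none'
  let rt := if _h : right ≠ [] then dfsA right (d + 1) else NTree.none'
  let v0 := (if left ≠ [] then ntval lt else 0) + (if right ≠ [] then ntval rt else 0)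
  -- arr[0].v: under Pre_solve dfsA is only reached with arr ≠ [], so the default is never read
  NTree.node (if left = [] ∧ right = [] then (arr.head?.map (·.2)).getD 0 else v0) lt rt
termination_by (arr.map (fun p => p.1.length - d)).sum
decreasing_by
  · simp only [left] at _h
    rw [List.unattach_filter (g := fun p => decide (d < p.1.length) && (p.1.getD d '?' == '0'))
        (hf := fun x h => rfl), List.unattach_attach] at _h ⊢
    exact pvFilterSumLt _ _ _ (by intro a ha; simp at ha; omega) arr _h
  · simp only [right] at _h
    rw [List.unattach_filter (g := fun p => decide (d < p.1.length) && !(p.1.getD d '?' == '0'))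
        (hf := fun x h => rfl), List.unattach_attach] at _h ⊢
    exact pvFilterSumLt _ _ _ (by intro a ha; simp at ha; omega) arr _h

def treeSz : NTree → Nat
  | .none' => 1
  | .node _ l r => 3 + treeSz l + treeSz r

-- A's BFS: pop front, '#' for None, else value then push both children
def bfsA : List NTree → List String
  | [] => []
  | NTree.none' :: rest => "#" :: bfsA rest
  | NTree.node v l r :: rest => PySem.Int.toStr v :: bfsA (rest ++ [l, r])
termination_by q => (q.map treeSz).sum
decreasing_by
  all_goals (simp [treeSz, List.map_append]; try omega)

def solve (leaf : List String) (vals : List Int) : List String :=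
  -- Python builds arr as [T(leaf[i], vals[i]) for i in range(len(leaf))]; under Pre_solve
  -- (leaf.length ≤ vals.length) that indexing never raises and equals this zip.
  let arr := (List.zip leaf vals).map (fun p => (p.1.toList, p.2))
  bfsA [dfsA arr 0]

-- ===== PORT B =====
-- pointer trie: tip = absent node, br l r term; term = first value terminating here
inductive BT where
  | tip
  | br (l : BT) (r : BT) (term : Option Int)
deriving DecidableEq, Repr

-- walk/create nodes bit-by-bit ('0' → left), keep the FIRST terminator
def ins : BT → List Char → Int → BT
  | .tip, [], v => .br .tip .tip (some v)
  | .br l r t, [], v => .br l r (match t with | none => some v | some x => some x)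
  | .tip, c :: cs, v =>
      if c = '0' then .br (ins .tip cs v) .tip none else .br .tip (ins .tip cs v) none
  | .br l r t, c :: cs, v =>
      if c = '0' then .br (ins l cs v) r t else .br l (ins r cs v) t

def nval : NTree → Int
  | .none' => 0
  | .node v _ _ => v

-- postorder value pass: children sum if any child exists, else the terminator
-- (term is present at every childless node reachable under Pre_solve; getD 0 is never read)
def toN : BT → NTree
  | .tip => .none'
  | .br l r t =>
    let ln := toN l
    let rn := toN r
    NTree.node
      (match ln, rn with
        | NTree.none', NTree.none' => t.getD 0
        | _, _ => nval ln + nval rn) ln rn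

-- B's BFS (deque popleft / append)
def bfsB : List NTree → List String
  | [] => []
  | NTree.none' :: rest => "#" :: bfsB rest
  | NTree.node v l r :: rest => PySem.Int.toStr v :: bfsB (rest ++ [l, r])
termination_by q => (q.map treeSz).sum
decreasing_by
  all_goals (simp [treeSz, List.map_append]; try omega)

def solve_alt (leaf : List String) (vals : List Int) : List String :=
  let vt := toN ((List.zip leaf vals).foldl (fun t p => ins t p.1.toList p.2) BT.tip)
  bfsB [vt]

-- ===== PRECONDITION & SPEC =====
-- Pre_ excludes exactly the inputs on which A raises IndexError: empty leaf (dfs reads arr[0])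
-- and vals shorter than leaf (the comprehension reads vals[i] out of range).
def Pre_solve (leaf : List String) (vals : List Int) : Prop :=
  leaf ≠ [] ∧ leaf.length ≤ vals.length
instance (leaf : List String) (vals : List Int) : Decidable (Pre_solve leaf vals) := by
  unfold Pre_solve; infer_instance

def pvWitness_solve : List String × List Int := (["0", "01", "1"], [3, 4, 5])

def Spec_solve (leaf : List String) (vals : List Int) (out : List String) : Prop := out = solve_alt leaf vals
instance (leaf : List String) (vals : List Int) (out : List String) : Decidable (Spec_solve leaf vals out) := by unfold Spec_solve; infer_instance

-- ===== CLAIM (what is proved, stated in full; the proofs are below) =====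
def Claim_equal_solve : Prop := ∀ (leaf : List String) (vals : List Int), Dom_solve leaf vals → Pre_solve leaf vals → Spec_solve leaf vals (solve leaf vals)

-- ===== LEMMAS AND PROOFS =====

-- proof-side view of A's dfs on explicit tails (depth pointer removed)
def Lof (arr : List (List Char × Int)) : List (List Char × Int) :=
  (arr.filter (fun p => !p.1.isEmpty && (p.1.headD '?' == '0'))).map (fun p => (p.1.tail, p.2))

def Rof (arr : List (List Char × Int)) : List (List Char × Int) :=
  (arr.filter (fun p => !p.1.isEmpty && !(p.1.headD '?' == '0'))).map (fun p => (p.1.tail, p.2))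

theorem szP_Lof_lt (arr : List (List Char × Int)) (h : Lof arr ≠ []) :
    ((Lof arr).map (fun p => p.1.length + 1)).sum < (arr.map (fun p => p.1.length + 1)).sum := by
  simp only [Lof] at h ⊢
  rw [List.map_map]
  refine pvFilterSumLt _ _ _ ?_ arr (by intro hc; rw [hc] at h; simp at h)
  intro a ha
  simp at ha ⊢
  cases h1 : a.1 with
  | nil => simp [h1] at ha
  | cons c cs => simp

theorem szP_Rof_lt (arr : List (List Char × Int)) (h : Rof arr ≠ []) :
    ((Rof arr).map (fun p => p.1.length + 1)).sum < (arr.map (fun p => p.1.length + 1)).sum := by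
  simp only [Rof] at h ⊢
  rw [List.map_map]
  refine pvFilterSumLt _ _ _ ?_ arr (by intro hc; rw [hc] at h; simp at h)
  intro a ha
  simp at ha ⊢
  cases h1 : a.1 with
  | nil => simp [h1] at ha
  | cons c cs => simp

def dfs' (arr : List (List Char × Int)) : NTree :=
  let L := Lof arr
  let R := Rof arr
  let lt := if _h : L ≠ [] then dfs' L else NTree.none'
  let rt := if _h : R ≠ [] then dfs' R else NTree.none'
  let v0 := (if L ≠ [] then ntval lt else 0) + (if R ≠ [] then ntval rt else 0)
  NTree.node (if L = [] ∧ R = [] then (arr.head?.map (·.2)).getD 0 else v0) lt rt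
termination_by (arr.map (fun p => p.1.length + 1)).sum
decreasing_by
  · exact szP_Lof_lt arr (by simpa [L] using _h)
  · exact szP_Rof_lt arr (by simpa [R] using _h)

theorem pv_Lof_map (arr : List (List Char × Int)) (d : Nat) (hlen : ∀ p ∈ arr, d ≤ p.1.length) :
    Lof (arr.map (fun p => (p.1.drop d, p.2))) =
      (arr.filter (fun p => decide (d < p.1.length) && (p.1.getD d '?' == '0'))).map
        (fun p => (p.1.drop (d + 1), p.2)) := by
  simp only [Lof, List.filter_map, List.map_map]
  rw [List.filter_congr (q := fun p => decide (d < p.1.length) && (p.1.getD d '?' == '0'))]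
  · apply List.map_congr_left
    intro a _
    show ((a.1.drop d).tail, a.2) = (List.drop (d + 1) a.1, a.2)
    rw [List.tail_drop]
  · intro a ha
    have hd := hlen a ha
    simp only [Function.comp, List.headD_eq_head?_getD, List.head?_drop,
      List.getD_eq_getElem?_getD]
    have hIE : (List.drop d a.1).isEmpty = decide (a.1.length ≤ d) := by
      rw [Bool.eq_iff_iff]
      simp [List.isEmpty_iff, List.drop_eq_nil_iff]
    rw [hIE]
    rcases Nat.lt_or_ge d a.1.length with h | h
    · rw [decide_eq_false (by omega : ¬ (a.1.length ≤ d)), decide_eq_true h]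
      simp
    · rw [decide_eq_true h, decide_eq_false (by omega : ¬ (d < a.1.length))]
      simp

theorem pv_Rof_map (arr : List (List Char × Int)) (d : Nat) (hlen : ∀ p ∈ arr, d ≤ p.1.length) :
    Rof (arr.map (fun p => (p.1.drop d, p.2))) =
      (arr.filter (fun p => decide (d < p.1.length) && !(p.1.getD d '?' == '0'))).map
        (fun p => (p.1.drop (d + 1), p.2)) := by
  simp only [Rof, List.filter_map, List.map_map]
  rw [List.filter_congr (q := fun p => decide (d < p.1.length) && !(p.1.getD d '?' == '0'))]
  · apply List.map_congr_left
    intro a _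
    show ((a.1.drop d).tail, a.2) = (List.drop (d + 1) a.1, a.2)
    rw [List.tail_drop]
  · intro a ha
    have hd := hlen a ha
    simp only [Function.comp, List.headD_eq_head?_getD, List.head?_drop,
      List.getD_eq_getElem?_getD]
    have hIE : (List.drop d a.1).isEmpty = decide (a.1.length ≤ d) := by
      rw [Bool.eq_iff_iff]
      simp [List.isEmpty_iff, List.drop_eq_nil_iff]
    rw [hIE]
    rcases Nat.lt_or_ge d a.1.length with h | h
    · rw [decide_eq_false (by omega : ¬ (a.1.length ≤ d)), decide_eq_true h]
      simp
    · rw [decide_eq_true h, decide_eq_false (by omega : ¬ (d < a.1.length))]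
      simp

theorem pv_bridge : ∀ (n : Nat) (arr : List (List Char × Int)) (d : Nat),
    (arr.map (fun p => p.1.length - d)).sum ≤ n →
    (∀ p ∈ arr, d ≤ p.1.length) →
    dfsA arr d = dfs' (arr.map (fun p => (p.1.drop d, p.2))) := by
  intro n
  induction n using Nat.strong_induction_on with
  | _ n ih =>
    intro arr d hsz hlen
    rw [dfsA, dfs']
    rw [pv_Lof_map arr d hlen, pv_Rof_map arr d hlen]
    have hlenL : ∀ p ∈ arr.filter (fun p => decide (d < p.1.length) && (p.1.getD d '?' == '0')),
        d + 1 ≤ p.1.length := by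
      intro p hp
      have := List.mem_filter.mp hp
      simp at this
      omega
    have hlenR : ∀ p ∈ arr.filter (fun p => decide (d < p.1.length) && !(p.1.getD d '?' == '0')),
        d + 1 ≤ p.1.length := by
      intro p hp
      have := List.mem_filter.mp hp
      simp at this
      omega
    by_cases hL : arr.filter (fun p => decide (d < p.1.length) && (p.1.getD d '?' == '0')) = [] <;>
      by_cases hR : arr.filter (fun p => decide (d < p.1.length) && !(p.1.getD d '?' == '0')) = []
    · try simp only [List.getD_eq_getElem?_getD] at *
      simp [hL, hR]
      cases arr <;> simp
    · have hmR : ((arr.filter (fun p => decide (d < p.1.length) && !(p.1.getD d '?' == '0'))).map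
          (fun p => p.1.length - (d + 1))).sum < n :=
        lt_of_lt_of_le (pvFilterSumLt _ _ _ (by intro a ha; simp at ha; omega) arr hR) hsz
      have hRe := ih _ hmR _ (d + 1) le_rfl hlenR
      try simp only [List.getD_eq_getElem?_getD] at *
      simp [hL, hR, hRe]
    · have hmL : ((arr.filter (fun p => decide (d < p.1.length) && (p.1.getD d '?' == '0'))).map
          (fun p => p.1.length - (d + 1))).sum < n :=
        lt_of_lt_of_le (pvFilterSumLt _ _ _ (by intro a ha; simp at ha; omega) arr hL) hsz
      have hLe := ih _ hmL _ (d + 1) le_rfl hlenL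
      try simp only [List.getD_eq_getElem?_getD] at *
      simp [hL, hR, hLe]
    · have hmL : ((arr.filter (fun p => decide (d < p.1.length) && (p.1.getD d '?' == '0'))).map
          (fun p => p.1.length - (d + 1))).sum < n :=
        lt_of_lt_of_le (pvFilterSumLt _ _ _ (by intro a ha; simp at ha; omega) arr hL) hsz
      have hmR : ((arr.filter (fun p => decide (d < p.1.length) && !(p.1.getD d '?' == '0'))).map
          (fun p => p.1.length - (d + 1))).sum < n :=
        lt_of_lt_of_le (pvFilterSumLt _ _ _ (by intro a ha; simp at ha; omega) arr hR) hsz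
      have hLe := ih _ hmL _ (d + 1) le_rfl hlenL
      have hRe := ih _ hmR _ (d + 1) le_rfl hlenR
      try simp only [List.getD_eq_getElem?_getD] at *
      simp [hL, hR, hLe, hRe]

theorem Lof_append (l₁ l₂ : List (List Char × Int)) : Lof (l₁ ++ l₂) = Lof l₁ ++ Lof l₂ := by
  simp [Lof, List.filter_append]

theorem Rof_append (l₁ l₂ : List (List Char × Int)) : Rof (l₁ ++ l₂) = Rof l₁ ++ Rof l₂ := by
  simp [Rof, List.filter_append]

theorem pv_fold : ∀ (arr : List (List Char × Int)), arr ≠ [] →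
    arr.foldl (fun t p => ins t p.1 p.2) BT.tip =
      BT.br ((Lof arr).foldl (fun t p => ins t p.1 p.2) BT.tip)
            ((Rof arr).foldl (fun t p => ins t p.1 p.2) BT.tip)
            ((arr.find? (fun p => p.1.isEmpty)).map (·.2)) := by
  intro arr
  induction arr using List.reverseRecOn with
  | nil => intro h; exact absurd rfl h
  | append_singleton l x ih =>
    intro _
    obtain ⟨cs, v⟩ := x
    rw [List.foldl_append, Lof_append, Rof_append, List.find?_append]
    rcases eq_or_ne l [] with rfl | hl
    · cases cs with
      | nil => simp [ins, Lof, Rof, List.find?]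
      | cons c cs' =>
        by_cases hc : c = '0'
        · simp [ins, hc, Lof, Rof, List.find?]
        · simp [ins, hc, Lof, Rof, List.find?]
    · rw [ih hl]
      cases cs with
      | nil =>
        cases hft : (l.find? (fun p => p.1.isEmpty)) with
        | none => simp [ins, Lof, Rof, List.find?]
        | some a => simp [ins, Lof, Rof, List.find?]
      | cons c cs' =>
        by_cases hc : c = '0'
        · simp [ins, hc, Lof, Rof, List.find?, List.foldl_append]
        · simp [ins, hc, Lof, Rof, List.find?, List.foldl_append]

theorem pv_all_nil (arr : List (List Char × Int)) (hL : Lof arr = []) (hR : Rof arr = []) :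
    ∀ p ∈ arr, p.1 = [] := by
  intro p hp
  by_contra hne
  cases h1 : p.1 with
  | nil => exact hne h1
  | cons c cs =>
    by_cases hc : c = '0'
    · have : (p.1.tail, p.2) ∈ Lof arr := by
        simp only [Lof]
        exact List.mem_map_of_mem (List.mem_filter.mpr ⟨hp, by simp [h1, hc]⟩)
      simp [hL] at this
    · have : (p.1.tail, p.2) ∈ Rof arr := by
        simp only [Rof]
        exact List.mem_map_of_mem (List.mem_filter.mpr ⟨hp, by simp [h1, hc]⟩)
      simp [hR] at this

theorem pv_fold_ne_tip (arr : List (List Char × Int)) (hne : arr ≠ []) :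
    arr.foldl (fun t p => ins t p.1 p.2) BT.tip ≠ BT.tip := by
  rw [pv_fold arr hne]; simp

theorem pv_main : ∀ (n : Nat) (arr : List (List Char × Int)),
    (arr.map (fun p => p.1.length + 1)).sum ≤ n → arr ≠ [] →
    dfs' arr = toN (arr.foldl (fun t p => ins t p.1 p.2) BT.tip) := by
  intro n
  induction n using Nat.strong_induction_on with
  | _ n ih =>
    intro arr hsz hne
    rw [pv_fold arr hne, dfs', toN]
    by_cases hL : Lof arr = [] <;> by_cases hR : Rof arr = []
    · -- both empty: childless node takes first terminator = first element's value
      have hall := pv_all_nil arr hL hR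
      have hfind : arr.find? (fun p => p.1.isEmpty) = arr.head? := by
        cases arr with
        | nil => rfl
        | cons a t =>
          have : a.1 = [] := hall a (by simp)
          simp [List.find?, this]
      simp [hL, hR, toN, hfind, List.foldl_nil]
    · -- L empty, R nonempty
      have hmR : ((Rof arr).map (fun p => p.1.length + 1)).sum < n :=
        lt_of_lt_of_le (szP_Rof_lt arr hR) hsz
      have hRe := ih _ hmR (Rof arr) le_rfl hR
      rcases hfold : List.foldl (fun t p => ins t p.1 p.2) BT.tip (Rof arr) with _ | ⟨a, b, t⟩
      · exact absurd hfold (pv_fold_ne_tip _ hR)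
      · rw [hfold] at hRe
        simp [hL, hR, toN, ntval, nval, hRe, hfold]
    · -- L nonempty, R empty
      have hmL : ((Lof arr).map (fun p => p.1.length + 1)).sum < n :=
        lt_of_lt_of_le (szP_Lof_lt arr hL) hsz
      have hLe := ih _ hmL (Lof arr) le_rfl hL
      rcases hfold : List.foldl (fun t p => ins t p.1 p.2) BT.tip (Lof arr) with _ | ⟨a, b, t⟩
      · exact absurd hfold (pv_fold_ne_tip _ hL)
      · rw [hfold] at hLe
        simp [hL, hR, toN, ntval, nval, hLe, hfold]
    · -- both nonempty
      have hmL : ((Lof arr).map (fun p => p.1.length + 1)).sum < n :=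
        lt_of_lt_of_le (szP_Lof_lt arr hL) hsz
      have hmR : ((Rof arr).map (fun p => p.1.length + 1)).sum < n :=
        lt_of_lt_of_le (szP_Rof_lt arr hR) hsz
      have hLe := ih _ hmL (Lof arr) le_rfl hL
      have hRe := ih _ hmR (Rof arr) le_rfl hR
      rcases hfoldL : List.foldl (fun t p => ins t p.1 p.2) BT.tip (Lof arr) with _ | ⟨a, b, t⟩
      · exact absurd hfoldL (pv_fold_ne_tip _ hL)
      · rcases hfoldR : List.foldl (fun t p => ins t p.1 p.2) BT.tip (Rof arr) with _ | ⟨a', b', t'⟩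
        · exact absurd hfoldR (pv_fold_ne_tip _ hR)
        · rw [hfoldL] at hLe
          rw [hfoldR] at hRe
          simp [hL, hR, toN, ntval, nval, hLe, hRe, hfoldL, hfoldR]

theorem pv_bfs_eq : ∀ (q : List NTree), bfsA q = bfsB q := by
  intro q
  induction q using bfsA.induct with
  | case1 => simp [bfsA, bfsB]
  | case2 rest ih => simp [bfsA, bfsB, ih]
  | case3 v l r rest ih => simp [bfsA, bfsB, ih]

-- ===== VERDICT (by name: the statement is the Claim_ definition above) =====
theorem solve_spec : Claim_equal_solve := by
  unfold Claim_equal_solve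
  intro leaf vals _ hpre
  obtain ⟨h1, h2⟩ := hpre
  unfold Spec_solve solve solve_alt
  have hzip : List.zip leaf vals ≠ [] := by
    cases leaf with
    | nil => exact absurd rfl h1
    | cons a t =>
      cases vals with
      | nil => simp at h2
      | cons b s => simp
  have hne : (List.zip leaf vals).map (fun p => (p.1.toList, p.2)) ≠ [] := by
    simpa using hzip
  have hb := pv_bridge (((List.zip leaf vals).map (fun p => (p.1.toList, p.2))).map
      (fun p => p.1.length - 0)).sum ((List.zip leaf vals).map (fun p => (p.1.toList, p.2))) 0
      le_rfl (by intro p _; omega)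
  have h0 : ((List.zip leaf vals).map (fun p => (p.1.toList, p.2))).map
      (fun p => (p.1.drop 0, p.2)) = (List.zip leaf vals).map (fun p => (p.1.toList, p.2)) := by
    simp
  rw [h0] at hb
  rw [pv_bfs_eq, hb,
    pv_main ((((List.zip leaf vals).map (fun p => (p.1.toList, p.2))).map
      (fun p => p.1.length + 1)).sum) _ le_rfl hne, List.foldl_map]
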